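-- pv_equiv track=rewrite | github.com/AnanasClassic/MIPT_CV_project | integral_generator.py | _last_nonspace_char
-- ===== SOURCE A (Python) =====
-- from typing import Dict, List, Optional, Union
--
-- def _last_nonspace_char(out: List[str]) -> str:
--     for s in reversed(out):
--         if not s:
--             continue
--         j = len(s) - 1
--         while j >= 0 and s[j].isspace():
--             j -= 1
--         if j >= 0:
--             return s[j]
--     return ""
-- ===== SOURCE B (Python) =====
-- def _last_nonspace_char(out):
--     return "".join(out).rstrip()[-1:]
-- ===== Notes on version B (the rewrite author's own statement) =====
-- stated objective: simpler
-- what changed: Replaces the reversed outer loop with a per-string backward while scan by a single join + rstrip + [-1:] slice on the full concatenation.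
import Mathlib
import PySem

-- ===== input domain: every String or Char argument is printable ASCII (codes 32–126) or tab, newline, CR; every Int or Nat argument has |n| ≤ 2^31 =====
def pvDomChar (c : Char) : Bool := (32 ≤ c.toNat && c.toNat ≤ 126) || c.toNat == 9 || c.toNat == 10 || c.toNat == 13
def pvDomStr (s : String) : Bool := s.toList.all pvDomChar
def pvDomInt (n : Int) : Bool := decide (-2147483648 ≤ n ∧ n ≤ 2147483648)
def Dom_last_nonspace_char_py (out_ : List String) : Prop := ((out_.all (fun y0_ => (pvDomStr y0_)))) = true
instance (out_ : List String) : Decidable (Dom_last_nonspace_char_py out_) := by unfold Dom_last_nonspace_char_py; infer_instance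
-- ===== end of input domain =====

-- B replaces A's reversed outer loop + per-string backward scan with join + rstrip + [-1:] on the whole concatenation (simpler, same cost).

-- ===== PORT A =====
-- inner 'while j >= 0 and s[j].isspace(): j -= 1'
def pvAWhile (cs : List Char) (j : Int) : Int :=
  if 0 ≤ j ∧ PySem.Chars.isspace (PySem.List.pyGetD cs j ' ') = true then
    pvAWhile cs (j - 1)
  else j
termination_by (j + 1).toNat
decreasing_by omega

-- outer 'for s in reversed(out): …' body (applied to out.reverse)
def pvALoop : List String → String
  | [] => ""
  | s :: rest =>
    if s.toList = [] then pvALoop rest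
    else
      let j := pvAWhile s.toList (PySem.Str.len s - 1)
      if 0 ≤ j then String.mk [PySem.List.pyGetD s.toList j ' '] else pvALoop rest

def last_nonspace_char_py (out_ : List String) : String :=
  pvALoop out_.reverse

-- ===== PORT B =====
-- '"".join(out).rstrip()[-1:]'
def last_nonspace_char_py_alt (out_ : List String) : String :=
  let t := PySem.Chars.rstrip (PySem.Chars.join [] (out_.map String.toList))
  String.mk (PySem.List.slice t (some (-1)) none)

-- ===== PRECONDITION & SPEC =====
def Spec_last_nonspace_char_py (out_ : List String) (out : String) : Prop := out = last_nonspace_char_py_alt out_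
instance (out_ : List String) (out : String) : Decidable (Spec_last_nonspace_char_py out_ out) := by unfold Spec_last_nonspace_char_py; infer_instance

-- ===== CLAIM (what is proved, stated in full; the proofs are below) =====
def Claim_equal_last_nonspace_char_py : Prop := ∀ (out_ : List String), Dom_last_nonspace_char_py out_ → Spec_last_nonspace_char_py out_ (last_nonspace_char_py out_)

-- ===== LEMMAS AND PROOFS =====

-- the last non-space character of a character list, as an Option
def pvLnc (cs : List Char) : Option Char :=
  (cs.reverse.dropWhile PySem.Chars.isspace).head?

def pvOptStr : Option Char → String
  | some c => String.mk [c]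
  | none => ""

theorem pvAWhile_unfold (cs : List Char) (j : Int) :
    pvAWhile cs j =
      if 0 ≤ j ∧ PySem.Chars.isspace (PySem.List.pyGetD cs j ' ') = true then
        pvAWhile cs (j - 1)
      else j := by
  rw [pvAWhile]

-- the scan never reads above its index: appending a character beyond j is invisible
theorem pvAWhile_append (ds : List Char) (c : Char) (j : Int) (hj : j < (ds.length : Int)) :
    pvAWhile (ds ++ [c]) j = pvAWhile ds j := by
  by_cases h0 : 0 ≤ j
  · have hlt2 : j < ((ds ++ [c]).length : Int) := by simp; omega
    have hn : j.toNat < ds.length := by omega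
    have hg : PySem.List.pyGetD (ds ++ [c]) j ' ' = PySem.List.pyGetD ds j ' ' := by
      rw [PySem.List.pyGetD_eq_getElem _ _ h0 hlt2, PySem.List.pyGetD_eq_getElem _ _ h0 (by omega)]
      exact List.getElem_append_left hn
    rw [pvAWhile_unfold, pvAWhile_unfold ds, hg]
    by_cases hs : PySem.Chars.isspace (PySem.List.pyGetD ds j ' ') = true
    · rw [if_pos ⟨h0, hs⟩, if_pos ⟨h0, hs⟩]
      exact pvAWhile_append ds c (j - 1) (by omega)
    · rw [if_neg (by tauto), if_neg (by tauto)]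
  · rw [pvAWhile_unfold, pvAWhile_unfold ds]
    simp [h0]
termination_by (j + 1).toNat
decreasing_by omega

-- the scan index never increases
theorem pvAWhile_le (cs : List Char) (j : Int) : pvAWhile cs j ≤ j := by
  rw [pvAWhile_unfold]
  split_ifs with h
  · have := pvAWhile_le cs (j - 1)
    omega
  · exact le_refl j
termination_by (j + 1).toNat
decreasing_by omega

-- the per-string scan computes pvLnc
theorem pvAWhile_lnc (cs : List Char) :
    (if 0 ≤ pvAWhile cs ((cs.length : Int) - 1) then
       some (PySem.List.pyGetD cs (pvAWhile cs ((cs.length : Int) - 1)) ' ')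
     else none) = pvLnc cs := by
  induction cs using List.reverseRecOn with
  | nil =>
      rw [pvAWhile_unfold]
      norm_num [pvLnc]
  | append_singleton ds c ih =>
      have hlen : (((ds ++ [c]).length : Int) - 1) = (ds.length : Int) := by
        simp
      rw [hlen]
      have hget : PySem.List.pyGetD (ds ++ [c]) (ds.length : Int) ' ' = c := by
        rw [PySem.List.pyGetD_eq_getElem _ _ (by positivity) (by simp)]
        simp
      by_cases hs : PySem.Chars.isspace c = true
      · have hl2 : pvLnc (ds ++ [c]) = pvLnc ds := by
          simp [pvLnc, hs]
        rw [pvAWhile_unfold]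
        have hcond : (0 ≤ (ds.length : Int) ∧ PySem.Chars.isspace (PySem.List.pyGetD (ds ++ [c]) (ds.length : Int) ' ') = true) := ⟨by positivity, by rw [hget]; exact hs⟩
        rw [if_pos hcond]
        rw [pvAWhile_append ds c _ (by omega), hl2]
        set r := pvAWhile ds ((ds.length : Int) - 1) with hr
        by_cases h0 : 0 ≤ r
        · have hle : r ≤ (ds.length : Int) - 1 := pvAWhile_le ds _
          have hg2 : PySem.List.pyGetD (ds ++ [c]) r ' ' = PySem.List.pyGetD ds r ' ' := by
            rw [PySem.List.pyGetD_eq_getElem _ _ h0 (by simp; omega),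
                PySem.List.pyGetD_eq_getElem _ _ h0 (by omega)]
            exact List.getElem_append_left (by omega)
          rw [if_pos h0, hg2]
          rw [if_pos h0] at ih
          exact ih
        · rw [if_neg h0]
          rw [if_neg h0] at ih
          exact ih
      · rw [pvAWhile_unfold]
        have hcond : ¬ (0 ≤ (ds.length : Int) ∧ PySem.Chars.isspace (PySem.List.pyGetD (ds ++ [c]) (ds.length : Int) ' ') = true) := by rw [hget]; tauto
        rw [if_neg hcond]
        rw [if_pos (by positivity : (0:Int) ≤ (ds.length : Int)), hget]
        simp [pvLnc, hs]

-- first hit, scanning the strings head-first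
def pvH : List String → Option Char
  | [] => none
  | s :: rest => (pvLnc s.toList).or (pvH rest)

-- A's outer loop returns the first per-string hit
theorem pvALoop_eq (l : List String) : pvALoop l = pvOptStr (pvH l) := by
  induction l with
  | nil => rfl
  | cons s rest ih =>
      rw [pvALoop, pvH]
      by_cases he : s.toList = []
      · rw [if_pos he]
        have : pvLnc s.toList = none := by rw [he]; rfl
        rw [this, Option.none_or]
        exact ih
      · rw [if_neg he]
        have hlen : PySem.Str.len s - 1 = ((s.toList.length : Int) - 1) := by
          simp [PySem.Str.len_eq]
        rw [hlen]
        have := pvAWhile_lnc s.toList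
        by_cases h0 : 0 ≤ pvAWhile s.toList ((s.toList.length : Int) - 1)
        · rw [if_pos h0]
          rw [if_pos h0] at this
          rw [← this, Option.some_or]
          rfl
        · rw [if_neg h0]
          rw [if_neg h0] at this
          rw [← this, Option.none_or]
          exact ih

theorem pvH_append_singleton (a : List String) (s : String) :
    pvH (a ++ [s]) = (pvH a).or (pvLnc s.toList) := by
  induction a with
  | nil => simp [pvH]
  | cons x xs ih => rw [List.cons_append, pvH, pvH, ih, Option.or_assoc]

theorem pvLnc_append (xs ys : List Char) :
    pvLnc (xs ++ ys) = (pvLnc ys).or (pvLnc xs) := by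
  unfold pvLnc
  rw [List.reverse_append, List.dropWhile_append]
  cases h : List.dropWhile PySem.Chars.isspace ys.reverse with
  | nil => simp
  | cons a l => simp

theorem pvJoin_cons (x : List Char) (xs : List (List Char)) :
    PySem.Chars.join [] (x :: xs) = x ++ PySem.Chars.join [] xs := by
  cases xs <;> simp [PySem.Chars.join, List.intercalate]

-- the first hit over the reversed list is the last non-space char of the concatenation
theorem pvH_reverse (out_ : List String) :
    pvH out_.reverse = pvLnc (PySem.Chars.join [] (out_.map String.toList)) := by
  induction out_ with
  | nil => rfl
  | cons s rest ih =>
      rw [List.reverse_cons, pvH_append_singleton, ih, List.map_cons, pvJoin_cons, pvLnc_append]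

theorem pvSlice_last (xs : List Char) (a : Char) :
    PySem.List.slice (xs ++ [a]) (some (-1)) none = [a] := by
  have h1 : PySem.List.clampIdx (xs ++ [a]).length (-1) = xs.length := by
    simp [PySem.List.clampIdx]
  simp only [PySem.List.slice, h1]
  simp

-- B computes pvOptStr of the same pvLnc
theorem pvAlt_eq (out_ : List String) :
    last_nonspace_char_py_alt out_ = pvOptStr (pvLnc (PySem.Chars.join [] (out_.map String.toList))) := by
  unfold last_nonspace_char_py_alt pvLnc
  rw [PySem.Chars.rstrip]
  cases h : List.dropWhile PySem.Chars.isspace (PySem.Chars.join [] (out_.map String.toList)).reverse with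
  | nil => rfl
  | cons a l =>
      rw [List.reverse_cons]
      show String.mk (PySem.List.slice (l.reverse ++ [a]) (some (-1)) none) = pvOptStr (a :: l).head?
      rw [pvSlice_last]
      rfl

-- ===== VERDICT (by name: the statement is the Claim_ definition above) =====
theorem last_nonspace_char_py_spec : Claim_equal_last_nonspace_char_py := by
  intro out_ _
  unfold Spec_last_nonspace_char_py
  rw [last_nonspace_char_py, pvALoop_eq, pvH_reverse, pvAlt_eq]
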